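-- pv_equiv track=rewrite | github.com/bgabrovsek/Latex2Moodle | latex.py | clean_eq
-- ===== SOURCE A (Python) =====
-- def clean_eq(s):
--     q = s
--     replacements = [("<=","Đ"),("\\leq","Đ"),(">=","đ"),("\\geq","đ"),("!=","ć"),("\\neq","ć"),("==","Ć"),("=","Ć"),
--                     ("Đ","<="),              ("đ",">="),              ("ć","!="),              ("Ć","==")]
--     while q.find(' ') > -1:
--         q = q.replace(' ','')
--     for s1, s2 in replacements:
--         q = q.replace(s1, s2)
--     return q
-- ===== SOURCE B (Python) =====
-- def clean_eq(s):
--     q = s.replace(' ', '')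
--     out = []
--     i = 0
--     n = len(q)
--     while i < n:
--         if q.startswith('<=', i):
--             out.append('<='); i += 2
--         elif q.startswith('\\leq', i):
--             out.append('<='); i += 4
--         elif q.startswith('>=', i):
--             out.append('>='); i += 2
--         elif q.startswith('\\geq', i):
--             out.append('>='); i += 4
--         elif q.startswith('!=', i):
--             out.append('!='); i += 2
--         elif q.startswith('\\neq', i):
--             out.append('!='); i += 4
--         elif q.startswith('==', i):
--             out.append('=='); i += 2
--         elif q.startswith('=', i):
--             out.append('=='); i += 1
--         else:
--             out.append(q[i]); i += 1
--     return ''.join(out)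
-- ===== Notes on version B (the rewrite author's own statement) =====
-- stated objective: alternative
-- what changed: A repeatedly rewrites the whole string with twelve sequential global str.replace passes through placeholder sentinel characters (encode then decode); B strips spaces once and does a single left-to-right priority scan that matches each operator token once and emits its normalised form directly, with no intermediate strings.
import Mathlib
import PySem

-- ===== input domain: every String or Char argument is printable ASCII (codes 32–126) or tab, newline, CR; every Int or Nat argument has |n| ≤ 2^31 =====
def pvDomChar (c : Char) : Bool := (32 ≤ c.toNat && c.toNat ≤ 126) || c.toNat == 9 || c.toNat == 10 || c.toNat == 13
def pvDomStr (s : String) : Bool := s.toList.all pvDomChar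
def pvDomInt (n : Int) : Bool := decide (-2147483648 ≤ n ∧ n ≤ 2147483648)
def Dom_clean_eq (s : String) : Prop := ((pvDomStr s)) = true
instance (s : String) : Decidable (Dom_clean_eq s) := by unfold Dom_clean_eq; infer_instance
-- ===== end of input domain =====

set_option maxRecDepth 8192

-- B replaces A's twelve sequential global replace passes (encode to placeholders, then decode)
-- by one space removal plus a single left-to-right priority token scan; same return value on Dom.

-- ===== PORT A =====
-- Lemma needed by the port's termination proof (the while loop stops because one
-- `replace(' ','')` already removes every space): the result of replacing ' ' by '' has no ' '.
theorem pvGoSpaceFree : ∀ (fuel : Nat) (l acc : List Char), l.length ≤ fuel → ' ' ∉ acc →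
    ' ' ∉ PySem.Chars.replace.go [' '] [] fuel l acc := by
  intro fuel
  induction fuel with
  | zero =>
    intro l acc h hacc
    have : l = [] := by cases l <;> simp_all
    subst this
    simp [PySem.Chars.replace.go]
    simpa using hacc
  | succ n ih =>
    intro l acc h hacc
    match l with
    | [] =>
      simp [PySem.Chars.replace.go]
      simpa using hacc
    | c :: t =>
      rw [PySem.Chars.replace.go]
      by_cases hp : ([' '] : List Char).isPrefixOf (c :: t)
      · simp only [hp, if_pos]
        apply ih
        · simp at h ⊢; omega
        · simpa using hacc
      · simp only [hp, Bool.false_eq_true, if_false]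
        apply ih
        · simp at h ⊢; omega
        · have hc : c ≠ ' ' := by
            intro hc; subst hc; simp [List.isPrefixOf] at hp
          intro hmem
          rcases List.mem_cons.mp hmem with h1 | h2
          · exact hc h1.symm
          · exact hacc h2

theorem pvReplaceSpaceFree (q : String) : ' ' ∉ (PySem.Str.replace q " " "").toList := by
  rw [PySem.Str.toList_replace]
  show ' ' ∉ PySem.Chars.replace q.toList [' '] []
  rw [PySem.Chars.replace]
  simp only [List.isEmpty_iff, reduceCtorEq, if_false]
  exact pvGoSpaceFree q.toList.length q.toList [] le_rfl (by simp)

-- while q.find(' ') > -1: q = q.replace(' ','')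
def stripSpaces (q : String) : String :=
  if h : PySem.Str.find q " " > -1 then stripSpaces (PySem.Str.replace q " " "") else q
termination_by q.toList.count ' '
decreasing_by
  have h0 : 0 ≤ PySem.Str.find q " " := by omega
  rw [PySem.Str.find_nonneg_iff] at h0
  have hmem : ' ' ∈ q.toList := by
    rw [← List.singleton_infix_iff]; simpa using h0
  have h1 : (PySem.Str.replace q " " "").toList.count ' ' = 0 :=
    List.count_eq_zero.mpr (pvReplaceSpaceFree q)
  have h2 : 0 < q.toList.count ' ' := List.count_pos_iff.mpr hmem
  omega

def pvReplacements : List (String × String) :=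
  [("<=","Đ"),("\\leq","Đ"),(">=","đ"),("\\geq","đ"),("!=","ć"),("\\neq","ć"),("==","Ć"),("=","Ć"),
   ("Đ","<="),("đ",">="),("ć","!="),("Ć","==")]

def clean_eq (s : String) : String :=
  List.foldl (fun q r => PySem.Str.replace q r.1 r.2) (stripSpaces s) pvReplacements

-- ===== PORT B =====
-- the single left-to-right priority scan of Source B (startswith('X', i) checks, in order)
def scanB : List Char → List Char
  | [] => []
  | c :: t =>
    if List.isPrefixOf ['<','='] (c :: t) then '<' :: '=' :: scanB (t.drop 1)
    else if List.isPrefixOf ['\\','l','e','q'] (c :: t) then '<' :: '=' :: scanB (t.drop 3)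
    else if List.isPrefixOf ['>','='] (c :: t) then '>' :: '=' :: scanB (t.drop 1)
    else if List.isPrefixOf ['\\','g','e','q'] (c :: t) then '>' :: '=' :: scanB (t.drop 3)
    else if List.isPrefixOf ['!','='] (c :: t) then '!' :: '=' :: scanB (t.drop 1)
    else if List.isPrefixOf ['\\','n','e','q'] (c :: t) then '!' :: '=' :: scanB (t.drop 3)
    else if List.isPrefixOf ['=','='] (c :: t) then '=' :: '=' :: scanB (t.drop 1)
    else if c = '=' then '=' :: '=' :: scanB t
    else c :: scanB t
termination_by l => l.length
decreasing_by all_goals (simp; try omega)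

def clean_eq_alt (s : String) : String :=
  String.ofList (scanB (PySem.Str.replace s " " "").toList)

-- ===== PRECONDITION & SPEC =====
def Spec_clean_eq (s : String) (out : String) : Prop := out = clean_eq_alt s
instance (s : String) (out : String) : Decidable (Spec_clean_eq s out) := by unfold Spec_clean_eq; infer_instance

-- ===== CLAIM (what is proved, stated in full; the proofs are below) =====
def Claim_equal_clean_eq : Prop := ∀ (s : String), Dom_clean_eq s → Spec_clean_eq s (clean_eq s)

-- ===== LEMMAS AND PROOFS =====

def repAux (a : Char) (o' new : List Char) : List Char → List Char
  | [] => []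
  | c :: t =>
    if (a :: o').isPrefixOf (c :: t) then new ++ repAux a o' new (t.drop o'.length)
    else c :: repAux a o' new t
termination_by l => l.length
decreasing_by all_goals (simp; try omega)

theorem repAux_cons (a : Char) (o' new : List Char) (c : Char) (t : List Char) :
    repAux a o' new (c :: t) =
      if (a :: o').isPrefixOf (c :: t) then new ++ repAux a o' new (t.drop o'.length)
      else c :: repAux a o' new t := by
  rw [repAux]

theorem go_eq_repAux (a : Char) (o' new : List Char) :
    ∀ (fuel : Nat) (l acc : List Char), l.length ≤ fuel →
      PySem.Chars.replace.go (a :: o') new fuel l acc = acc.reverse ++ repAux a o' new l := by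
  intro fuel
  induction fuel with
  | zero =>
    intro l acc h
    have : l = [] := by cases l <;> simp_all
    subst this; simp [PySem.Chars.replace.go, repAux]
  | succ n ih =>
    intro l acc h
    match l with
    | [] => simp [PySem.Chars.replace.go, repAux]
    | c :: t =>
      rw [PySem.Chars.replace.go]
      by_cases hp : (a :: o').isPrefixOf (c :: t)
      · simp only [hp, if_pos, repAux]
        rw [ih]
        · simp
        · simp at h ⊢; omega
      · simp only [hp, Bool.false_eq_true, if_false, repAux]
        rw [ih]
        · simp
        · simp at h ⊢; omega

theorem replace_eq_repAux (a : Char) (o' new l : List Char) :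
    PySem.Chars.replace l (a :: o') new = repAux a o' new l := by
  rw [PySem.Chars.replace]
  simp [go_eq_repAux a o' new l.length l [] le_rfl]

theorem repAux_single (a : Char) (new : List Char) :
    ∀ l, repAux a [] new l = l.flatMap (fun c => if c = a then new else [c]) := by
  intro l
  induction l with
  | nil => simp [repAux]
  | cons c t ih =>
    rw [repAux]
    by_cases hc : c = a
    · subst hc; simp [ih]
    · simp [List.isPrefixOf, Ne.symm hc, hc, ih]

def isSent (c : Char) : Bool := c == 'Đ' || c == 'đ' || c == 'ć' || c == 'Ć'

def scanL (L : List (List Char × List Char)) : List Char → List Char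
  | [] => []
  | c :: t =>
    match List.find? (fun po => po.1.isPrefixOf (c :: t)) L with
    | some (p, o) =>
      if hp : p.length = 0 then c :: scanL L t
      else o ++ scanL L ((c :: t).drop p.length)
    | none => c :: scanL L t
termination_by l => l.length
decreasing_by all_goals (simp; try omega)

theorem scanL_cons (L : List (List Char × List Char)) (c : Char) (t : List Char) :
    scanL L (c :: t) =
      match List.find? (fun po => po.1.isPrefixOf (c :: t)) L with
      | some (p, o) =>
        if p.length = 0 then c :: scanL L t
        else o ++ scanL L ((c :: t).drop p.length)
      | none => c :: scanL L t := by
  rw [scanL]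
  cases List.find? (fun po => po.1.isPrefixOf (c :: t)) L with
  | none => rfl
  | some po => obtain ⟨p, o⟩ := po; by_cases h : p.length = 0 <;> simp [h]

theorem scanL_nil_tokens : ∀ l, scanL [] l = l := by
  intro l
  induction l with
  | nil => simp [scanL]
  | cons c t ih => rw [scanL_cons]; simp [ih]

theorem scanL_copy_out (L : List (List Char × List Char))
    (hL : ∀ po ∈ L, ∃ x, po.2 = [x] ∧ isSent x = true) :
    ∀ (w t : List Char), (∀ c ∈ w, isSent c = false) → w <+: scanL L t →
      w <+: t ∧ scanL L t = w ++ scanL L (t.drop w.length) := by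
  intro w
  induction w with
  | nil => intro t _ _; simp
  | cons a w' ih =>
    intro t hw hpre
    match t with
    | [] =>
      rw [scanL] at hpre
      simp at hpre
    | c :: t' =>
      rw [scanL] at hpre ⊢
      cases hfind : List.find? (fun po => po.1.isPrefixOf (c :: t')) L with
      | some po =>
        obtain ⟨p, o⟩ := po
        simp only [hfind] at hpre ⊢
        by_cases hp0 : p.length = 0
        · rw [dif_pos hp0] at hpre ⊢
          have hac : a = c := (List.cons_prefix_cons.mp hpre).1
          have hrest : w' <+: scanL L t' := (List.cons_prefix_cons.mp hpre).2
          obtain ⟨h1, h2⟩ := ih t' (fun x hx => hw x (List.mem_cons_of_mem _ hx)) hrest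
          subst hac
          exact ⟨List.cons_prefix_cons.mpr ⟨rfl, h1⟩, by simp [h2]⟩
        · rw [dif_neg hp0] at hpre ⊢
          -- output starts with a placeholder, w is placeholder-free: contradiction
          obtain ⟨x, hx, hxs⟩ := hL _ (List.mem_of_find?_eq_some hfind)
          simp only at hx
          rw [hx] at hpre
          have hax : a = x := (List.cons_prefix_cons.mp (by simpa using hpre)).1
          have := hw a (List.mem_cons_self)
          rw [hax, hxs] at this
          exact absurd this (by simp)
      | none =>
        simp only [hfind] at hpre ⊢
        have hac : a = c := (List.cons_prefix_cons.mp hpre).1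
        have hrest : w' <+: scanL L t' := (List.cons_prefix_cons.mp hpre).2
        obtain ⟨h1, h2⟩ := ih t' (fun x hx => hw x (List.mem_cons_of_mem _ hx)) hrest
        subst hac
        exact ⟨List.cons_prefix_cons.mpr ⟨rfl, h1⟩, by simp [h2]⟩

theorem scanL_copy_in (L : List (List Char × List Char))
    (hne : ∀ po ∈ L, po.1 ≠ []) :
    ∀ (w t : List Char), (∀ po ∈ L, ∀ a, po.1.head? = some a → a ∉ w) → w <+: t →
      scanL L t = w ++ scanL L (t.drop w.length) := by
  intro w
  induction w with
  | nil => intro t _ _; simp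
  | cons a w' ih =>
    intro t hw hpre
    match t with
    | [] => simp at hpre
    | c :: t' =>
      have hac : a = c := (List.cons_prefix_cons.mp hpre).1
      have hrest : w' <+: t' := (List.cons_prefix_cons.mp hpre).2
      subst hac
      have hfind : List.find? (fun po => po.1.isPrefixOf (a :: t')) L = none := by
        rw [List.find?_eq_none]
        intro po hpo
        obtain ⟨b, p', hp⟩ : ∃ b p', po.1 = b :: p' := by
          cases h : po.1 with
          | nil => exact absurd h (hne po hpo)
          | cons b p' => exact ⟨b, p', rfl⟩
        simp only [hp]
        intro hpref
        have hba : b = a := by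
          have := List.isPrefixOf_iff_prefix.mp hpref
          exact (List.cons_prefix_cons.mp this).1
        exact hw po hpo b (by simp [hp]) (by simp [hba])
      rw [scanL]
      simp only [hfind]
      rw [ih t' (fun po hpo b hb hmem => hw po hpo b hb (List.mem_cons_of_mem _ hmem)) hrest]
      simp

theorem scanL_step (L : List (List Char × List Char)) (c0 : Char) (rest : List Char) (s : Char)
    (hLsent : ∀ po ∈ L, ∃ x, po.2 = [x] ∧ isSent x = true)
    (hLne : ∀ po ∈ L, po.1 ≠ [])
    (hc0 : isSent c0 = false)
    (hrest : ∀ c ∈ rest, isSent c = false)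
    (hs : isSent s = true)
    (hspan : ∀ po ∈ L, ∀ a, po.1.head? = some a → a ∉ rest) :
    ∀ l, (∀ c ∈ l, isSent c = false) →
      repAux c0 rest [s] (scanL L l) = scanL (L ++ [(c0 :: rest, [s])]) l := by
  suffices h : ∀ (n : Nat) (l : List Char), l.length ≤ n → (∀ c ∈ l, isSent c = false) →
      repAux c0 rest [s] (scanL L l) = scanL (L ++ [(c0 :: rest, [s])]) l by
    intro l hl; exact h l.length l le_rfl hl
  intro n
  induction n with
  | zero =>
    intro l hn _
    have : l = [] := by cases l <;> simp_all
    subst this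
    simp [scanL, repAux]
  | succ n ih =>
    intro l hn hsf
    match l with
    | [] => simp [scanL, repAux]
    | c :: t =>
      have hsf' : ∀ x ∈ t, isSent x = false := fun x hx => hsf x (List.mem_cons_of_mem _ hx)
      have hcs : isSent c = false := hsf c List.mem_cons_self
      cases hfind : List.find? (fun po => po.1.isPrefixOf (c :: t)) L with
      | some po =>
        obtain ⟨p, o⟩ := po
        have hpo := List.mem_of_find?_eq_some hfind
        have hpne : p ≠ [] := hLne _ hpo
        have hp0 : ¬ p.length = 0 := by simpa using hpne
        obtain ⟨x, hx, hxs⟩ := hLsent _ hpo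
        simp only at hx
        have hfind' : List.find? (fun po => po.1.isPrefixOf (c :: t)) (L ++ [(c0 :: rest, [s])])
            = some (p, o) := by
          rw [List.find?_append, hfind]; rfl
        rw [scanL_cons, scanL_cons]
        simp only [hfind, hfind', hp0, if_false, hx, List.singleton_append]
        rw [repAux_cons]
        have hhead : (c0 :: rest).isPrefixOf (x :: scanL L ((c :: t).drop p.length)) = false := by
          rw [Bool.eq_false_iff]
          intro hc
          have := (List.cons_prefix_cons.mp (List.isPrefixOf_iff_prefix.mp hc)).1
          subst this
          rw [hxs] at hc0; exact absurd hc0 (by simp)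
        rw [hhead]
        simp only [Bool.false_eq_true, if_false]
        congr 1
        have hlen : ((c :: t).drop p.length).length ≤ n := by
          have : 1 ≤ p.length := by
            cases p with
            | nil => exact absurd rfl hpne
            | cons a b => simp
          simp only [List.length_drop, List.length_cons]
          simp at hn
          omega
        exact ih _ hlen (fun y hy => hsf y (List.mem_of_mem_drop hy))
      | none =>
        have hfind' : List.find? (fun po => po.1.isPrefixOf (c :: t)) (L ++ [(c0 :: rest, [s])])
            = if (c0 :: rest).isPrefixOf (c :: t) then some (c0 :: rest, [s]) else none := by
          rw [List.find?_append, hfind]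
          by_cases hcc : (c0 :: rest).isPrefixOf (c :: t) <;> simp [hcc]
        by_cases hp : (c0 :: rest).isPrefixOf (c :: t)
        · -- the new token matches: c = c0, rest <+: t
          have hpp := List.isPrefixOf_iff_prefix.mp hp
          have hcc0 : c = c0 := (List.cons_prefix_cons.mp hpp).1.symm
          have hrt : rest <+: t := (List.cons_prefix_cons.mp hpp).2
          have hcopy : scanL L t = rest ++ scanL L (t.drop rest.length) :=
            scanL_copy_in L hLne rest t (fun po hpo a ha => hspan po hpo a ha) hrt
          rw [scanL_cons, scanL_cons]
          simp only [hfind, hfind']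
          rw [if_pos hp]
          simp only [List.length_cons, Nat.succ_ne_zero, if_false]
          rw [hcopy, repAux_cons]
          have hpref : (c0 :: rest).isPrefixOf (c :: (rest ++ scanL L (t.drop rest.length))) = true := by
            rw [List.isPrefixOf_iff_prefix, hcc0]
            exact List.cons_prefix_cons.mpr ⟨rfl, List.prefix_append _ _⟩
          rw [hpref]
          simp only [if_true]
          rw [List.drop_append_of_le_length le_rfl, List.drop_length, List.nil_append]
          simp only [List.drop_succ_cons]
          congr 1
          have hlen : (t.drop rest.length).length ≤ n := by
            simp only [List.length_drop]
            simp at hn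
            omega
          exact ih _ hlen (fun y hy => hsf' y (List.mem_of_mem_drop hy))
        · -- no token matches at all: plain copy on both sides
          rw [scanL_cons, scanL_cons]
          simp only [hfind, hfind', hp, if_false]
          have hnp : (c0 :: rest).isPrefixOf (c :: scanL L t) = false := by
            rw [Bool.eq_false_iff]
            intro hc
            have hpp := List.isPrefixOf_iff_prefix.mp hc
            have hcc0 : c = c0 := (List.cons_prefix_cons.mp hpp).1.symm
            have hrt : rest <+: scanL L t := (List.cons_prefix_cons.mp hpp).2
            have := (scanL_copy_out L hLsent rest t hrest hrt).1
            exact hp (by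
              rw [List.isPrefixOf_iff_prefix, hcc0]
              exact List.cons_prefix_cons.mpr ⟨rfl, this⟩)
          rw [repAux_cons, hnp]
          simp only [Bool.false_eq_true, if_false]
          congr 1
          exact ih t (by simp at hn; omega) hsf'

def encTokens : List (List Char × List Char) :=
  [(['<','='],['Đ']), (['\\','l','e','q'],['Đ']), (['>','='],['đ']), (['\\','g','e','q'],['đ']),
   (['!','='],['ć']), (['\\','n','e','q'],['ć']), (['=','='],['Ć']), (['='],['Ć'])]

theorem enc_chain : ∀ l, (∀ c ∈ l, isSent c = false) →
    repAux '=' [] ['Ć'] (repAux '=' ['='] ['Ć'] (repAux '\\' ['n','e','q'] ['ć']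
      (repAux '!' ['='] ['ć'] (repAux '\\' ['g','e','q'] ['đ'] (repAux '>' ['='] ['đ']
        (repAux '\\' ['l','e','q'] ['Đ'] (repAux '<' ['='] ['Đ'] l)))))))
    = scanL encTokens l := by
  intro l hsf
  have e1 := scanL_step [] '<' ['='] 'Đ'
      (by simp)
      (by simp)
      (by decide) (by intro c hc; fin_cases hc <;> decide) (by decide)
      (by simp) l hsf
  simp only [List.cons_append, List.nil_append] at e1
  have e2 := scanL_step [(['<','='],['Đ'])] '\\' ['l','e','q'] 'Đ'
      (by intro po hpo; fin_cases hpo <;> exact ⟨_, rfl, by decide⟩)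
      (by intro po hpo; fin_cases hpo <;> simp)
      (by decide) (by intro c hc; fin_cases hc <;> decide) (by decide)
      (by intro po hpo a ha; fin_cases hpo <;> simp at ha <;> subst ha <;> decide) l hsf
  simp only [List.cons_append, List.nil_append] at e2
  have e3 := scanL_step [(['<','='],['Đ']), (['\\','l','e','q'],['Đ'])] '>' ['='] 'đ'
      (by intro po hpo; fin_cases hpo <;> exact ⟨_, rfl, by decide⟩)
      (by intro po hpo; fin_cases hpo <;> simp)
      (by decide) (by intro c hc; fin_cases hc <;> decide) (by decide)
      (by intro po hpo a ha; fin_cases hpo <;> simp at ha <;> subst ha <;> decide) l hsf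
  simp only [List.cons_append, List.nil_append] at e3
  have e4 := scanL_step [(['<','='],['Đ']), (['\\','l','e','q'],['Đ']), (['>','='],['đ'])] '\\' ['g','e','q'] 'đ'
      (by intro po hpo; fin_cases hpo <;> exact ⟨_, rfl, by decide⟩)
      (by intro po hpo; fin_cases hpo <;> simp)
      (by decide) (by intro c hc; fin_cases hc <;> decide) (by decide)
      (by intro po hpo a ha; fin_cases hpo <;> simp at ha <;> subst ha <;> decide) l hsf
  simp only [List.cons_append, List.nil_append] at e4
  have e5 := scanL_step [(['<','='],['Đ']), (['\\','l','e','q'],['Đ']), (['>','='],['đ']), (['\\','g','e','q'],['đ'])] '!' ['='] 'ć'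
      (by intro po hpo; fin_cases hpo <;> exact ⟨_, rfl, by decide⟩)
      (by intro po hpo; fin_cases hpo <;> simp)
      (by decide) (by intro c hc; fin_cases hc <;> decide) (by decide)
      (by intro po hpo a ha; fin_cases hpo <;> simp at ha <;> subst ha <;> decide) l hsf
  simp only [List.cons_append, List.nil_append] at e5
  have e6 := scanL_step [(['<','='],['Đ']), (['\\','l','e','q'],['Đ']), (['>','='],['đ']), (['\\','g','e','q'],['đ']), (['!','='],['ć'])] '\\' ['n','e','q'] 'ć'
      (by intro po hpo; fin_cases hpo <;> exact ⟨_, rfl, by decide⟩)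
      (by intro po hpo; fin_cases hpo <;> simp)
      (by decide) (by intro c hc; fin_cases hc <;> decide) (by decide)
      (by intro po hpo a ha; fin_cases hpo <;> simp at ha <;> subst ha <;> decide) l hsf
  simp only [List.cons_append, List.nil_append] at e6
  have e7 := scanL_step [(['<','='],['Đ']), (['\\','l','e','q'],['Đ']), (['>','='],['đ']), (['\\','g','e','q'],['đ']), (['!','='],['ć']), (['\\','n','e','q'],['ć'])] '=' ['='] 'Ć'
      (by intro po hpo; fin_cases hpo <;> exact ⟨_, rfl, by decide⟩)
      (by intro po hpo; fin_cases hpo <;> simp)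
      (by decide) (by intro c hc; fin_cases hc <;> decide) (by decide)
      (by intro po hpo a ha; fin_cases hpo <;> simp at ha <;> subst ha <;> decide) l hsf
  simp only [List.cons_append, List.nil_append] at e7
  have e8 := scanL_step [(['<','='],['Đ']), (['\\','l','e','q'],['Đ']), (['>','='],['đ']), (['\\','g','e','q'],['đ']), (['!','='],['ć']), (['\\','n','e','q'],['ć']), (['=','='],['Ć'])] '=' [] 'Ć'
      (by intro po hpo; fin_cases hpo <;> exact ⟨_, rfl, by decide⟩)
      (by intro po hpo; fin_cases hpo <;> simp)
      (by decide) (by simp) (by decide)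
      (by intro po hpo a ha; fin_cases hpo <;> simp at ha <;> subst ha <;> decide) l hsf
  simp only [List.cons_append, List.nil_append] at e8
  rw [scanL_nil_tokens] at e1
  rw [e1, e2, e3, e4, e5, e6, e7, e8]
  rfl

def decodeAll (l : List Char) : List Char :=
  repAux 'Ć' [] ['=','='] (repAux 'ć' [] ['!','='] (repAux 'đ' [] ['>','='] (repAux 'Đ' [] ['<','='] l)))

theorem decodeAll_append (x y : List Char) : decodeAll (x ++ y) = decodeAll x ++ decodeAll y := by
  simp [decodeAll, repAux_single]

theorem decodeAll_nil : decodeAll [] = [] := by simp [decodeAll, repAux_single]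

theorem decodeAll_D : decodeAll ('Đ' :: x) = '<' :: '=' :: decodeAll x := by
  have h : decodeAll ['Đ'] = ['<','='] := by simp [decodeAll, repAux_single]
  calc decodeAll ('Đ' :: x) = decodeAll (['Đ'] ++ x) := by simp
    _ = '<' :: '=' :: decodeAll x := by rw [decodeAll_append, h]; rfl

theorem decodeAll_d : decodeAll ('đ' :: x) = '>' :: '=' :: decodeAll x := by
  have h : decodeAll ['đ'] = ['>','='] := by simp [decodeAll, repAux_single]
  calc decodeAll ('đ' :: x) = decodeAll (['đ'] ++ x) := by simp
    _ = '>' :: '=' :: decodeAll x := by rw [decodeAll_append, h]; rfl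

theorem decodeAll_cons_nonsent (c : Char) (x : List Char) (hc : isSent c = false) :
    decodeAll (c :: x) = c :: decodeAll x := by
  have h : decodeAll [c] = [c] := by
    simp only [isSent, Bool.or_eq_false_iff, beq_eq_false_iff_ne, ne_eq] at hc
    simp [decodeAll, repAux_single, hc.1.1.1, hc.1.1.2, hc.1.2, hc.2]
  calc decodeAll (c :: x) = decodeAll ([c] ++ x) := by simp
    _ = c :: decodeAll x := by rw [decodeAll_append, h]; rfl

theorem decodeAll_c : decodeAll ('ć' :: x) = '!' :: '=' :: decodeAll x := by
  have h : decodeAll ['ć'] = ['!','='] := by simp [decodeAll, repAux_single]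
  calc decodeAll ('ć' :: x) = decodeAll (['ć'] ++ x) := by simp
    _ = '!' :: '=' :: decodeAll x := by rw [decodeAll_append, h]; rfl

theorem decodeAll_C : decodeAll ('Ć' :: x) = '=' :: '=' :: decodeAll x := by
  have h : decodeAll ['Ć'] = ['=','='] := by simp [decodeAll, repAux_single]
  calc decodeAll ('Ć' :: x) = decodeAll (['Ć'] ++ x) := by simp
    _ = '=' :: '=' :: decodeAll x := by rw [decodeAll_append, h]; rfl

theorem dec_scanB : ∀ (n : Nat) (l : List Char), l.length ≤ n → (∀ c ∈ l, isSent c = false) →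
    decodeAll (scanL encTokens l) = scanB l := by
  intro n
  induction n with
  | zero =>
    intro l hn _
    have : l = [] := by cases l <;> simp_all
    subst this
    simp [scanL, scanB, decodeAll_nil]
  | succ n ih =>
    intro l hn hsf
    match l with
    | [] => simp [scanL, scanB, decodeAll_nil]
    | c :: t =>
      have hsf' : ∀ x ∈ t, isSent x = false := fun x hx => hsf x (List.mem_cons_of_mem _ hx)
      have hcs : isSent c = false := hsf c List.mem_cons_self
      have hlen : ∀ (k : Nat), (t.drop k).length ≤ n := by
        intro k
        simp only [List.length_drop]
        simp at hn
        omega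
      have hsfd : ∀ (k : Nat), ∀ x ∈ t.drop k, isSent x = false :=
        fun k x hx => hsf' x (List.mem_of_mem_drop hx)
      rw [scanL_cons, scanB]
      simp only [encTokens, List.find?]
      by_cases h1 : List.isPrefixOf ['<','='] (c :: t)
      · simp only [h1, if_true]
        rw [if_neg (by simp)]
        simp only [List.singleton_append, List.drop_succ_cons, List.drop_zero]
        rw [show List.drop ((['<','='] : List Char).length) (c :: t) = t.drop 1 from rfl]
        have ihh := ih (t.drop 1) (hlen 1) (hsfd 1)
        simp only [encTokens] at ihh
        rw [decodeAll_D, ihh]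
      · simp only [h1, Bool.false_eq_true, if_false]
        by_cases h2 : List.isPrefixOf ['\\','l','e','q'] (c :: t)
        · simp only [h2, if_true]
          rw [if_neg (by simp)]
          simp only [List.singleton_append, List.drop_succ_cons, List.drop_zero]
          rw [show List.drop ((['\\','l','e','q'] : List Char).length) (c :: t) = t.drop 3 from rfl]
          have ihh := ih (t.drop 3) (hlen 3) (hsfd 3)
          simp only [encTokens] at ihh
          rw [decodeAll_D, ihh]
        · simp only [h2, Bool.false_eq_true, if_false]
          by_cases h3 : List.isPrefixOf ['>','='] (c :: t)
          · simp only [h3, if_true]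
            rw [if_neg (by simp)]
            simp only [List.singleton_append, List.drop_succ_cons, List.drop_zero]
            rw [show List.drop ((['>','='] : List Char).length) (c :: t) = t.drop 1 from rfl]
            have ihh := ih (t.drop 1) (hlen 1) (hsfd 1)
            simp only [encTokens] at ihh
            rw [decodeAll_d, ihh]
          · simp only [h3, Bool.false_eq_true, if_false]
            by_cases h4 : List.isPrefixOf ['\\','g','e','q'] (c :: t)
            · simp only [h4, if_true]
              rw [if_neg (by simp)]
              simp only [List.singleton_append, List.drop_succ_cons, List.drop_zero]
              rw [show List.drop ((['\\','g','e','q'] : List Char).length) (c :: t) = t.drop 3 from rfl]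
              have ihh := ih (t.drop 3) (hlen 3) (hsfd 3)
              simp only [encTokens] at ihh
              rw [decodeAll_d, ihh]
            · simp only [h4, Bool.false_eq_true, if_false]
              by_cases h5 : List.isPrefixOf ['!','='] (c :: t)
              · simp only [h5, if_true]
                rw [if_neg (by simp)]
                simp only [List.singleton_append, List.drop_succ_cons, List.drop_zero]
                rw [show List.drop ((['!','='] : List Char).length) (c :: t) = t.drop 1 from rfl]
                have ihh := ih (t.drop 1) (hlen 1) (hsfd 1)
                simp only [encTokens] at ihh
                rw [decodeAll_c, ihh]
              · simp only [h5, Bool.false_eq_true, if_false]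
                by_cases h6 : List.isPrefixOf ['\\','n','e','q'] (c :: t)
                · simp only [h6, if_true]
                  rw [if_neg (by simp)]
                  simp only [List.singleton_append, List.drop_succ_cons, List.drop_zero]
                  rw [show List.drop ((['\\','n','e','q'] : List Char).length) (c :: t) = t.drop 3 from rfl]
                  have ihh := ih (t.drop 3) (hlen 3) (hsfd 3)
                  simp only [encTokens] at ihh
                  rw [decodeAll_c, ihh]
                · simp only [h6, Bool.false_eq_true, if_false]
                  by_cases h7 : List.isPrefixOf ['=','='] (c :: t)
                  · simp only [h7, if_true]
                    rw [if_neg (by simp)]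
                    simp only [List.singleton_append, List.drop_succ_cons, List.drop_zero]
                    rw [show List.drop ((['=','='] : List Char).length) (c :: t) = t.drop 1 from rfl]
                    have ihh := ih (t.drop 1) (hlen 1) (hsfd 1)
                    simp only [encTokens] at ihh
                    rw [decodeAll_C, ihh]
                  · simp only [h7, Bool.false_eq_true, if_false]
                    by_cases h8 : c = '='
                    · subst h8
                      have h8' : List.isPrefixOf ['='] ('=' :: t) = true := by simp [List.isPrefixOf]
                      simp only [h8', if_true]
                      rw [if_neg (by simp)]
                      simp only [List.singleton_append, List.drop_succ_cons, List.drop_zero]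
                      rw [show List.drop ((['='] : List Char).length) ('=' :: t) = t from rfl]
                      have ihh := ih t (hlen 0 |>.trans_eq' (by simp)) hsf'
                      simp only [encTokens] at ihh
                      rw [decodeAll_C, ihh]
                    · have h8' : List.isPrefixOf ['='] (c :: t) = false := by
                        simp [List.isPrefixOf]
                        intro hh; exact absurd hh.symm h8
                      simp only [h8', Bool.false_eq_true, if_false, h8]
                      have ihh := ih t (hlen 0 |>.trans_eq' (by simp)) hsf'
                      simp only [encTokens] at ihh
                      rw [decodeAll_cons_nonsent c _ hcs, ihh]

theorem flatMap_space_filter : ∀ l : List Char,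
    (l.flatMap fun c => if c = ' ' then [] else [c]) = l.filter (fun c => !(c == ' ')) := by
  intro l
  induction l with
  | nil => simp
  | cons c t ih => by_cases hc : c = ' ' <;> simp [hc, ih]

theorem replace_space_toList (q : String) :
    (PySem.Str.replace q " " "").toList = q.toList.filter (fun c => !(c == ' ')) := by
  rw [PySem.Str.toList_replace]
  rw [show (" " : String).toList = (' ' :: []) from rfl, show ("" : String).toList = [] from rfl]
  rw [replace_eq_repAux, repAux_single, flatMap_space_filter]

theorem no_space_find (r : String) (h : ' ' ∉ r.toList) : ¬ PySem.Str.find r " " > -1 := by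
  intro hgt
  have h0 : 0 ≤ PySem.Str.find r " " := by omega
  rw [PySem.Str.find_nonneg_iff] at h0
  exact h ((List.singleton_infix_iff _ _).mp (by simpa using h0))

theorem stripSpaces_toList (q : String) :
    (stripSpaces q).toList = q.toList.filter (fun c => !(c == ' ')) := by
  rw [stripSpaces]
  by_cases h : PySem.Str.find q " " > -1
  · rw [dif_pos h]
    have hr := pvReplaceSpaceFree q
    rw [stripSpaces, dif_neg (no_space_find _ hr)]
    exact replace_space_toList q
  · rw [dif_neg h]
    have hnm : ' ' ∉ q.toList := by
      intro hm
      exact h (by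
        have h0 : 0 ≤ PySem.Str.find q " " :=
          (PySem.Str.find_nonneg_iff q " ").mpr (by simpa using (List.singleton_infix_iff _ _).mpr hm)
        omega)
    rw [List.filter_eq_self.mpr]
    intro a ha
    simp only [Bool.not_eq_eq_eq_not, Bool.not_true, beq_eq_false_iff_ne, ne_eq]
    intro he; subst he; exact hnm ha

theorem clean_eq_toList (s : String) :
    (clean_eq s).toList =
      decodeAll (repAux '=' [] ['Ć'] (repAux '=' ['='] ['Ć'] (repAux '\\' ['n','e','q'] ['ć']
        (repAux '!' ['='] ['ć'] (repAux '\\' ['g','e','q'] ['đ'] (repAux '>' ['='] ['đ']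
          (repAux '\\' ['l','e','q'] ['Đ'] (repAux '<' ['='] ['Đ'] (stripSpaces s).toList)))))))) := by
  rw [clean_eq]
  simp only [pvReplacements, List.foldl_cons, List.foldl_nil]
  simp only [PySem.Str.toList_replace]
  simp only [show ("<=" : String).toList = ['<','='] from rfl,
    show ("\\leq" : String).toList = ['\\','l','e','q'] from rfl,
    show (">=" : String).toList = ['>','='] from rfl,
    show ("\\geq" : String).toList = ['\\','g','e','q'] from rfl,
    show ("!=" : String).toList = ['!','='] from rfl,
    show ("\\neq" : String).toList = ['\\','n','e','q'] from rfl,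
    show ("==" : String).toList = ['=','='] from rfl,
    show ("=" : String).toList = ['='] from rfl,
    show ("Đ" : String).toList = ['Đ'] from rfl,
    show ("đ" : String).toList = ['đ'] from rfl,
    show ("ć" : String).toList = ['ć'] from rfl,
    show ("Ć" : String).toList = ['Ć'] from rfl]
  simp only [replace_eq_repAux]
  rw [decodeAll]

theorem clean_eq_alt_toList (s : String) :
    (clean_eq_alt s).toList = scanB (s.toList.filter (fun c => !(c == ' '))) := by
  rw [clean_eq_alt]
  rw [String.toList_ofList, replace_space_toList]

theorem dom_not_sent (c : Char) (h : pvDomChar c = true) : isSent c = false := by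
  rw [Bool.eq_false_iff]
  intro hs
  simp only [isSent, Bool.or_eq_true, beq_iff_eq] at hs
  rcases hs with ((h1|h1)|h1)|h1 <;> subst h1 <;> exact absurd h (by decide)

theorem clean_eq_spec' : ∀ (s : String), Dom_clean_eq s → clean_eq s = clean_eq_alt s := by
  intro s hd
  apply String.toList_inj.mp
  rw [clean_eq_toList, clean_eq_alt_toList, stripSpaces_toList]
  have hsf : ∀ c ∈ s.toList.filter (fun c => !(c == ' ')), isSent c = false := by
    intro c hc
    have hmem : c ∈ s.toList := List.mem_of_mem_filter hc
    have hdc : pvDomChar c = true := by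
      unfold Dom_clean_eq pvDomStr at hd
      exact (List.all_eq_true.mp hd) c hmem
    exact dom_not_sent c hdc
  rw [enc_chain _ hsf, dec_scanB _ _ le_rfl hsf]

-- ===== VERDICT (by name: the statement is the Claim_ definition above) =====
theorem clean_eq_spec : Claim_equal_clean_eq := by
  intro s hd
  unfold Spec_clean_eq
  exact clean_eq_spec' s hd
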